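-- pv_equiv track=rewrite | github.com/jianantian/entity_recognizer | entity_finder.py | tagger
-- ===== SOURCE A (Python) =====
-- def tagger(sentense, dic):
--     """用 dic 中的词来匹配文本中的实体"""
--     n = len(sentense)
--     bool_mark = [False] * n
--     tag_list = []
--     for i in range(n, 0, -1):
--         for j in range(n - i + 1):
--             if bool_mark[j] is False and bool_mark[j + i - 1] is False:
--                 temp = sentense[j: j + i]
--                 if temp in dic:
--                     tag_list.append((temp, j, j + i - 1))
--                     for k in range(j, j + i):
--                         bool_mark[k] = True
--     return tag_list
-- ===== SOURCE B (Python) =====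
-- def tagger(sentense, dic):
--     """Collect every occurrence of every dictionary word word-by-word, order all matches
--     once by a single combined key (word length descending, then start ascending), then
--     replay the greedy endpoint-marking selection over that ordered match list."""
--     n = len(sentense)
--     matches = []
--     for w in dic:  # dict keys, in insertion order
--         L = len(w)
--         if 0 < L <= n:
--             for j in range(n - L + 1):
--                 if sentense[j:j + L] == w:
--                     matches.append((w, j, j + L - 1))
--     # combined key encodes (-length, start) lexicographically: starts lie in [0, n]
--     matches.sort(key=lambda m: m[1] - (n + 1) * len(m[0]))
--     mark = [False] * n
--     tag_list = []
--     for w, a, b in matches: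
--         if not mark[a] and not mark[b]:
--             tag_list.append((w, a, b))
--             for k in range(a, b + 1):
--                 mark[k] = True
--     return tag_list
-- ===== Notes on version B (the rewrite author's own statement) =====
-- stated objective: faster
-- what changed: B scans word-by-word over the dictionary keys to collect every occurrence of every word, sorts all matches once by a combined key (length descending, then start ascending), and only then replays the greedy endpoint-marking selection, instead of A's triple nested scan over every (length, position) pair with a dictionary membership test and marking interleaved.
import Mathlib
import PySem

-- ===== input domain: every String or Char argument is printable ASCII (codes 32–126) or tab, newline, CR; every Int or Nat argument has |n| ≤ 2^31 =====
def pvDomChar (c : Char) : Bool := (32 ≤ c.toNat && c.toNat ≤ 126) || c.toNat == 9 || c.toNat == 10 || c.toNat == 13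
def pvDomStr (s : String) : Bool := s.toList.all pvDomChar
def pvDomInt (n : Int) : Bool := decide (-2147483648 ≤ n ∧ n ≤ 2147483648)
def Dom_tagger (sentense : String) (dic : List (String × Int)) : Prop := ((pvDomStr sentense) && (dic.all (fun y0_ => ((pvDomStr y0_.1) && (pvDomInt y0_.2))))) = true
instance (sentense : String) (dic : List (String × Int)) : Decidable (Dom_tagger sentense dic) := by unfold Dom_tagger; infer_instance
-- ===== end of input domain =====

-- B replaces A's length-by-length scan with interleaved marking by a word-major collection pass
-- (every occurrence of every dictionary word), one global sort of the matches by a combined key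
-- (length descending, then start ascending), and a final greedy endpoint-marking replay.

-- ===== PORT A =====
-- literal port of A; bool_mark indexing is always in range (1 ≤ i ≤ n, 0 ≤ j ≤ n - i), so pyGetD/pySetD are exact there
def tagger (sentense : String) (dic : List (String × Int)) : List (String × Int × Int) :=
  let n : Int := PySem.Str.len sentense
  let st :=
    (PySem.List.pyRange n 0 (-1)).foldl (fun st i =>
      (PySem.List.pyRange 0 (n - i + 1) 1).foldl (fun st j =>
        if PySem.List.pyGetD st.1 j false = false ∧ PySem.List.pyGetD st.1 (j + i - 1) false = false then
          if dic.any (fun kv => kv.1 == PySem.Str.slice sentense (some j) (some (j + i))) then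
            ((PySem.List.pyRange j (j + i) 1).foldl (fun bm k => PySem.List.pySetD bm k true) st.1,
             st.2 ++ [(PySem.Str.slice sentense (some j) (some (j + i)), j, j + i - 1)])
          else st
        else st) st)
      ((List.replicate n.toNat false, []) : List Bool × List (String × Int × Int))
  st.2

-- ===== PORT B =====
-- literal port of Source B: word-major match collection ('for w in dic' = dict keys, insertion order),
-- one sort by the combined key start - (n+1)*len, then the greedy marking replay
def tagger_alt (sentense : String) (dic : List (String × Int)) : List (String × Int × Int) :=
  let n : Int := PySem.Str.len sentense
  let ms : List (String × Int × Int) :=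
    (PySem.Set.ofList (dic.map Prod.fst)).foldl (fun ms w =>
      if 0 < PySem.Str.len w ∧ PySem.Str.len w ≤ n then
        (PySem.List.pyRange 0 (n - PySem.Str.len w + 1) 1).foldl (fun ms j =>
          if PySem.Str.slice sentense (some j) (some (j + PySem.Str.len w)) == w then
            ms ++ [(w, j, j + PySem.Str.len w - 1)]
          else ms) ms
      else ms) []
  let sortedM := PySem.List.sorted ms (fun m => m.2.1 - (n + 1) * PySem.Str.len m.1) false
  let res :=
    sortedM.foldl (fun st wab =>
      if PySem.List.pyGetD st.1 wab.2.1 false = false ∧ PySem.List.pyGetD st.1 wab.2.2 false = false then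
        ((PySem.List.pyRange wab.2.1 (wab.2.2 + 1) 1).foldl (fun bm k => PySem.List.pySetD bm k true) st.1,
         st.2 ++ [wab])
      else st)
      ((List.replicate n.toNat false, []) : List Bool × List (String × Int × Int))
  res.2

-- ===== PRECONDITION & SPEC =====
def Spec_tagger (sentense : String) (dic : List (String × Int)) (out : List (String × Int × Int)) : Prop := out = tagger_alt sentense dic
instance (sentense : String) (dic : List (String × Int)) (out : List (String × Int × Int)) : Decidable (Spec_tagger sentense dic out) := by unfold Spec_tagger; infer_instance

-- ===== CLAIM (what is proved, stated in full; the proofs are below) =====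
def Claim_equal_tagger : Prop := ∀ (sentense : String) (dic : List (String × Int)), Dom_tagger sentense dic → Spec_tagger sentense dic (tagger sentense dic)

-- ===== LEMMAS AND PROOFS =====

-- proof-layer names for pieces of the two ports
def pvSub (s : String) (j L : Int) : String := PySem.Str.slice s (some j) (some (j + L))

def pvKeys (dic : List (String × Int)) : List String := PySem.Set.ofList (dic.map Prod.fst)

def pvMatch (s : String) (dic : List (String × Int)) (L j : Int) : Bool :=
  PySem.Set.contains (pvKeys dic) (pvSub s j L)

def pvStep (st : List Bool × List (String × Int × Int)) (wab : String × Int × Int) :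
    List Bool × List (String × Int × Int) :=
  if PySem.List.pyGetD st.1 wab.2.1 false = false ∧ PySem.List.pyGetD st.1 wab.2.2 false = false then
    ((PySem.List.pyRange wab.2.1 (wab.2.2 + 1) 1).foldl (fun bm k => PySem.List.pySetD bm k true) st.1,
     st.2 ++ [wab])
  else st

def pvBlocks (s : String) (dic : List (String × Int)) (n L : Int) : List (String × Int × Int) :=
  ((PySem.List.pyRange 0 (n - L + 1) 1).filter (pvMatch s dic L)).map
    (fun j => (pvSub s j L, j, j + L - 1))

def pvLenList (s : String) (dic : List (String × Int)) : List Int :=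
  ((pvKeys dic).filter (fun w => decide (0 < PySem.Str.len w ∧ PySem.Str.len w ≤ PySem.Str.len s))).map
    (fun w => PySem.Str.len w)

def pvLenHas (s : String) (dic : List (String × Int)) (i : Int) : Bool :=
  PySem.Set.contains (PySem.Set.ofList (pvLenList s dic)) i

def pvInit (s : String) : List Bool × List (String × Int × Int) :=
  (List.replicate (PySem.Str.len s).toNat false, [])

-- A's canonical match list: per-length blocks along the filtered countdown range
def pvC (s : String) (dic : List (String × Int)) : List (String × Int × Int) :=
  ((PySem.List.pyRange (PySem.Str.len s) 0 (-1)).filter (pvLenHas s dic)).flatMap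
    (pvBlocks s dic (PySem.Str.len s))

-- B's building blocks: all occurrences of one word, and the word-major match list
def pvWBlock (s : String) (n : Int) (w : String) : List (String × Int × Int) :=
  ((PySem.List.pyRange 0 (n - PySem.Str.len w + 1) 1).filter
      (fun j => PySem.Str.slice s (some j) (some (j + PySem.Str.len w)) == w)).map
    (fun j => (w, j, j + PySem.Str.len w - 1))

def pvKeysF (s : String) (dic : List (String × Int)) : List String :=
  (pvKeys dic).filter (fun w => decide (0 < PySem.Str.len w ∧ PySem.Str.len w ≤ PySem.Str.len s))

def pvM (s : String) (dic : List (String × Int)) : List (String × Int × Int) :=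
  (pvKeysF s dic).flatMap (pvWBlock s (PySem.Str.len s))

-- B's sort key
def pvKey (n : Int) (m : String × Int × Int) : Int := m.2.1 - (n + 1) * PySem.Str.len m.1

lemma pv_foldl_ite_filter {α σ : Type} (p : α → Bool) (g : σ → α → σ) :
    ∀ (l : List α) (s : σ),
      l.foldl (fun st x => if p x then g st x else st) s = (l.filter p).foldl g s := by
  intro l
  induction l with
  | nil => intro s; rfl
  | cons x t ih =>
    intro s
    by_cases h : p x = true <;> simp [h, ih]

lemma pv_foldl_ite_filter' {α σ : Type} (p : α → Prop) [DecidablePred p] (g : σ → α → σ) :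
    ∀ (l : List α) (s : σ),
      l.foldl (fun st x => if p x then g st x else st) s = (l.filter (fun x => decide (p x))).foldl g s := by
  intro l
  induction l with
  | nil => intro s; rfl
  | cons x t ih =>
    intro s
    by_cases h : p x <;> simp [h, ih]

lemma pv_foldl_skip {α σ : Type} (p : α → Bool) (f : σ → α → σ)
    (l : List α) (h : ∀ x ∈ l, p x = false → ∀ s, f s x = s) :
    ∀ s, l.foldl f s = (l.filter p).foldl f s := by
  induction l with
  | nil => intro s; rfl
  | cons x t ih =>
    intro s
    by_cases hx : p x = true
    · simp only [List.foldl_cons, List.filter_cons, hx, if_pos]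
      exact ih (fun y hy => h y (List.mem_cons_of_mem _ hy)) _
    · rw [List.foldl_cons, h x (List.mem_cons_self) (by simpa using hx),
        List.filter_cons_of_neg (by simpa using hx)]
      exact ih (fun y hy => h y (List.mem_cons_of_mem _ hy)) _

lemma pv_foldl_flatMap {α σ' σ : Type} (g : α → List σ') (f : σ → σ' → σ) :
    ∀ (l : List α) (s : σ),
      l.foldl (fun st i => (g i).foldl f st) s = (l.flatMap g).foldl f s := by
  intro l
  induction l with
  | nil => intro s; rfl
  | cons x t ih => intro s; simp only [List.foldl_cons, List.flatMap_cons, List.foldl_append, ih]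

-- A's membership test `temp in dic` agrees with membership in the key list
lemma pv_match_bridge (dic : List (String × Int)) (t : String) :
    dic.any (fun kv => kv.1 == t) = PySem.Set.contains (pvKeys dic) t := by
  rw [Bool.eq_iff_iff, List.any_eq_true, PySem.Set.contains_iff, pvKeys, PySem.Set.mem_ofList,
    List.mem_map]
  constructor
  · rintro ⟨kv, hkv, hb⟩
    exact ⟨kv, hkv, by simpa using hb⟩
  · rintro ⟨kv, hkv, hb⟩
    exact ⟨kv, hkv, by simp [hb]⟩

-- a substring sentense[j:j+L] with 0 ≤ j, 0 ≤ L, j + L ≤ len really has length L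
lemma pv_len_sub (s : String) (j L : Int) (h0 : 0 ≤ j) (hL : 0 ≤ L)
    (hend : j + L ≤ PySem.Str.len s) : PySem.Str.len (pvSub s j L) = L := by
  rw [PySem.Str.len_eq] at hend ⊢
  rw [pvSub, PySem.Str.toList_slice, PySem.Chars.slice_eq_listSlice,
    PySem.List.slice_toNat _ h0 (by omega)]
  simp only [List.length_take, List.length_drop]
  omega

-- A's inner-loop step equals "if it matches, do the replay step"
lemma pv_stepA_eq (s : String) (dic : List (String × Int)) (i : Int)
    (st : List Bool × List (String × Int × Int)) (j : Int) :
    (if PySem.List.pyGetD st.1 j false = false ∧ PySem.List.pyGetD st.1 (j + i - 1) false = false then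
        if dic.any (fun kv => kv.1 == PySem.Str.slice s (some j) (some (j + i))) then
          ((PySem.List.pyRange j (j + i) 1).foldl (fun bm k => PySem.List.pySetD bm k true) st.1,
           st.2 ++ [(PySem.Str.slice s (some j) (some (j + i)), j, j + i - 1)])
        else st
      else st)
      = if pvMatch s dic i j then pvStep st (pvSub s j i, j, j + i - 1) else st := by
  have hsub : PySem.Str.slice s (some j) (some (j + i)) = pvSub s j i := rfl
  rw [hsub, pv_match_bridge dic (pvSub s j i)]
  have harg : j + i - 1 + 1 = j + i := by ring
  by_cases hm : PySem.Set.contains (pvKeys dic) (pvSub s j i) = true <;>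
    by_cases hb : PySem.List.pyGetD st.1 j false = false ∧ PySem.List.pyGetD st.1 (j + i - 1) false = false <;>
      simp [pvMatch, pvStep, hb, harg]

-- A's inner loop over j is the replay of the block of matches at length i
lemma pv_inner_eq (s : String) (dic : List (String × Int)) (n i : Int)
    (st : List Bool × List (String × Int × Int)) :
    (PySem.List.pyRange 0 (n - i + 1) 1).foldl (fun st j =>
        if PySem.List.pyGetD st.1 j false = false ∧ PySem.List.pyGetD st.1 (j + i - 1) false = false then
          if dic.any (fun kv => kv.1 == PySem.Str.slice s (some j) (some (j + i))) then
            ((PySem.List.pyRange j (j + i) 1).foldl (fun bm k => PySem.List.pySetD bm k true) st.1,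
             st.2 ++ [(PySem.Str.slice s (some j) (some (j + i)), j, j + i - 1)])
          else st
        else st) st
      = (pvBlocks s dic n i).foldl pvStep st := by
  have hfun : (fun (st : List Bool × List (String × Int × Int)) j =>
      if PySem.List.pyGetD st.1 j false = false ∧ PySem.List.pyGetD st.1 (j + i - 1) false = false then
        if dic.any (fun kv => kv.1 == PySem.Str.slice s (some j) (some (j + i))) then
          ((PySem.List.pyRange j (j + i) 1).foldl (fun bm k => PySem.List.pySetD bm k true) st.1,
           st.2 ++ [(PySem.Str.slice s (some j) (some (j + i)), j, j + i - 1)])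
        else st
      else st)
      = fun st j => if pvMatch s dic i j then pvStep st (pvSub s j i, j, j + i - 1) else st := by
    funext st j; exact pv_stepA_eq s dic i st j
  rw [hfun, pv_foldl_ite_filter, pvBlocks, List.foldl_map]

-- lengths with no dictionary word of that length contribute no matches
lemma pv_blocks_nil (s : String) (dic : List (String × Int)) (i : Int)
    (hi : 0 < i) (hin : i ≤ PySem.Str.len s)
    (h : pvLenHas s dic i = false) :
    pvBlocks s dic (PySem.Str.len s) i = [] := by
  have hfilter : (PySem.List.pyRange 0 (PySem.Str.len s - i + 1) 1).filter (pvMatch s dic i) = [] := by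
    rw [List.filter_eq_nil_iff]
    intro j hj hm
    rw [PySem.List.mem_pyRange_one] at hj
    rw [pvMatch] at hm
    have hsub : pvSub s j i ∈ pvKeys dic := (PySem.Set.contains_iff _ _).mp hm
    have hlen : PySem.Str.len (pvSub s j i) = i :=
      pv_len_sub s j i hj.1 (le_of_lt hi) (by omega)
    have hmem : i ∈ pvLenList s dic := by
      rw [pvLenList]
      refine List.mem_map.mpr ⟨pvSub s j i, List.mem_filter.mpr ⟨hsub, ?_⟩, hlen⟩
      simp only [decide_eq_true_eq, PySem.Str.len_eq, String.length_toList] at hlen hin ⊢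
      omega
    have hc : pvLenHas s dic i = true := by
      rw [pvLenHas]
      exact (PySem.Set.contains_iff _ _).mpr ((PySem.Set.mem_ofList _ _).mpr hmem)
    simp [h] at hc
  rw [pvBlocks, hfilter, List.map_nil]

-- A in canonical form: replay of pvC
lemma pv_A_eq (s : String) (dic : List (String × Int)) :
    tagger s dic = ((pvC s dic).foldl pvStep (pvInit s)).2 := by
  show ((PySem.List.pyRange (PySem.Str.len s) 0 (-1)).foldl (fun st i =>
      (PySem.List.pyRange 0 (PySem.Str.len s - i + 1) 1).foldl (fun st j =>
        if PySem.List.pyGetD st.1 j false = false ∧ PySem.List.pyGetD st.1 (j + i - 1) false = false then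
          if dic.any (fun kv => kv.1 == PySem.Str.slice s (some j) (some (j + i))) then
            ((PySem.List.pyRange j (j + i) 1).foldl (fun bm k => PySem.List.pySetD bm k true) st.1,
             st.2 ++ [(PySem.Str.slice s (some j) (some (j + i)), j, j + i - 1)])
          else st
        else st) st) (pvInit s)).2 = _
  have hOuter : (fun (st : List Bool × List (String × Int × Int)) i =>
      (PySem.List.pyRange 0 (PySem.Str.len s - i + 1) 1).foldl (fun st j =>
        if PySem.List.pyGetD st.1 j false = false ∧ PySem.List.pyGetD st.1 (j + i - 1) false = false then
          if dic.any (fun kv => kv.1 == PySem.Str.slice s (some j) (some (j + i))) then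
            ((PySem.List.pyRange j (j + i) 1).foldl (fun bm k => PySem.List.pySetD bm k true) st.1,
             st.2 ++ [(PySem.Str.slice s (some j) (some (j + i)), j, j + i - 1)])
          else st
        else st) st)
      = fun st i => (pvBlocks s dic (PySem.Str.len s) i).foldl pvStep st := by
    funext st i; exact pv_inner_eq s dic (PySem.Str.len s) i st
  rw [hOuter]
  have hskip : ∀ i ∈ PySem.List.pyRange (PySem.Str.len s) 0 (-1), pvLenHas s dic i = false →
      ∀ st : List Bool × List (String × Int × Int),
        (pvBlocks s dic (PySem.Str.len s) i).foldl pvStep st = st := by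
    intro i hi hpi st
    rw [PySem.List.mem_pyRange_neg_one] at hi
    rw [pv_blocks_nil s dic i hi.1 hi.2 hpi, List.foldl_nil]
  rw [pv_foldl_skip (pvLenHas s dic) _ _ hskip, pv_foldl_flatMap]
  rfl

-- B's collection pass builds exactly the word-major match list pvM
lemma pv_matches_eq (s : String) (dic : List (String × Int)) :
    (PySem.Set.ofList (dic.map Prod.fst)).foldl (fun ms w =>
      if 0 < PySem.Str.len w ∧ PySem.Str.len w ≤ PySem.Str.len s then
        (PySem.List.pyRange 0 (PySem.Str.len s - PySem.Str.len w + 1) 1).foldl (fun ms j =>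
          if PySem.Str.slice s (some j) (some (j + PySem.Str.len w)) == w then
            ms ++ [(w, j, j + PySem.Str.len w - 1)]
          else ms) ms
      else ms) []
      = pvM s dic := by
  rw [pv_foldl_ite_filter' (fun w => 0 < PySem.Str.len w ∧ PySem.Str.len w ≤ PySem.Str.len s)]
  have hinner : (fun (ms : List (String × Int × Int)) w =>
      (PySem.List.pyRange 0 (PySem.Str.len s - PySem.Str.len w + 1) 1).foldl (fun ms j =>
        if PySem.Str.slice s (some j) (some (j + PySem.Str.len w)) == w then
          ms ++ [(w, j, j + PySem.Str.len w - 1)]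
        else ms) ms)
      = fun ms w => ms ++ pvWBlock s (PySem.Str.len s) w := by
    funext ms w
    have hshape : (fun (acc : List (String × Int × Int)) j =>
        if PySem.Str.slice s (some j) (some (j + PySem.Str.len w)) == w then
          acc ++ [(w, j, j + PySem.Str.len w - 1)]
        else acc)
        = fun acc j => if (fun j => PySem.Str.slice s (some j) (some (j + PySem.Str.len w)) == w) j then
            acc ++ [(fun j => (w, j, j + PySem.Str.len w - 1)) j] else acc := rfl
    rw [hshape, PySem.List.foldl_append_if]
    rfl
  rw [hinner, PySem.List.foldl_append_eq_flatMap, List.nil_append]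
  rfl

-- B in canonical form: replay of the sorted word-major match list
lemma pv_B_eq (s : String) (dic : List (String × Int)) :
    tagger_alt s dic
      = ((PySem.List.sorted (pvM s dic) (pvKey (PySem.Str.len s)) false).foldl pvStep (pvInit s)).2 := by
  show ((PySem.List.sorted ((PySem.Set.ofList (dic.map Prod.fst)).foldl (fun ms w =>
      if 0 < PySem.Str.len w ∧ PySem.Str.len w ≤ PySem.Str.len s then
        (PySem.List.pyRange 0 (PySem.Str.len s - PySem.Str.len w + 1) 1).foldl (fun ms j =>
          if PySem.Str.slice s (some j) (some (j + PySem.Str.len w)) == w then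
            ms ++ [(w, j, j + PySem.Str.len w - 1)]
          else ms) ms
      else ms) []) (pvKey (PySem.Str.len s)) false).foldl pvStep (pvInit s)).2 = _
  rw [pv_matches_eq]

-- membership characterisation of A's canonical list
lemma pv_mem_C (s : String) (dic : List (String × Int)) (x : String × Int × Int) :
    x ∈ pvC s dic ↔ ∃ (L j : Int), 0 < L ∧ L ≤ PySem.Str.len s ∧ 0 ≤ j ∧ j + L ≤ PySem.Str.len s ∧
      pvMatch s dic L j = true ∧ x = (pvSub s j L, j, j + L - 1) := by
  rw [pvC, List.mem_flatMap]
  constructor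
  · rintro ⟨L, hL, hx⟩
    have hLr := (PySem.List.mem_pyRange_neg_one).mp (List.mem_filter.mp hL).1
    rw [pvBlocks, List.mem_map] at hx
    obtain ⟨j, hj, hxe⟩ := hx
    have hjm := List.mem_filter.mp hj
    have hjr := (PySem.List.mem_pyRange_one).mp hjm.1
    exact ⟨L, j, hLr.1, hLr.2, hjr.1, by omega, hjm.2, hxe.symm⟩
  · rintro ⟨L, j, hL0, hLn, hj0, hjn, hm, hxe⟩
    have hsub : pvSub s j L ∈ pvKeys dic := (PySem.Set.contains_iff _ _).mp hm
    have hlen : PySem.Str.len (pvSub s j L) = L := pv_len_sub s j L hj0 (le_of_lt hL0) hjn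
    have hhas : pvLenHas s dic L = true := by
      rw [pvLenHas]
      refine (PySem.Set.contains_iff _ _).mpr ((PySem.Set.mem_ofList _ _).mpr ?_)
      rw [pvLenList]
      exact List.mem_map.mpr ⟨pvSub s j L, List.mem_filter.mpr ⟨hsub, by
        simp only [decide_eq_true_eq, hlen]; omega⟩, hlen⟩
    refine ⟨L, List.mem_filter.mpr ⟨(PySem.List.mem_pyRange_neg_one).mpr ⟨hL0, hLn⟩, hhas⟩, ?_⟩
    rw [pvBlocks, List.mem_map]
    exact ⟨j, List.mem_filter.mpr ⟨(PySem.List.mem_pyRange_one).mpr ⟨hj0, by omega⟩, hm⟩, hxe.symm⟩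

-- membership characterisation of B's match list
lemma pv_mem_M (s : String) (dic : List (String × Int)) (x : String × Int × Int) :
    x ∈ pvM s dic ↔ ∃ (L j : Int), 0 < L ∧ L ≤ PySem.Str.len s ∧ 0 ≤ j ∧ j + L ≤ PySem.Str.len s ∧
      pvMatch s dic L j = true ∧ x = (pvSub s j L, j, j + L - 1) := by
  rw [pvM, List.mem_flatMap]
  constructor
  · rintro ⟨w, hw, hx⟩
    have hwm := List.mem_filter.mp hw
    have hwb : 0 < PySem.Str.len w ∧ PySem.Str.len w ≤ PySem.Str.len s := by
      simpa using hwm.2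
    rw [pvWBlock, List.mem_map] at hx
    obtain ⟨j, hj, hxe⟩ := hx
    have hjm := List.mem_filter.mp hj
    have hjr := (PySem.List.mem_pyRange_one).mp hjm.1
    have hslice : pvSub s j (PySem.Str.len w) = w := by
      have := hjm.2
      exact eq_of_beq this
    refine ⟨PySem.Str.len w, j, hwb.1, hwb.2, hjr.1, by omega, ?_, ?_⟩
    · rw [pvMatch, hslice]
      exact (PySem.Set.contains_iff _ _).mpr hwm.1
    · rw [← hxe, hslice]
  · rintro ⟨L, j, hL0, hLn, hj0, hjn, hm, hxe⟩
    have hsub : pvSub s j L ∈ pvKeys dic := (PySem.Set.contains_iff _ _).mp hm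
    have hlen : PySem.Str.len (pvSub s j L) = L := pv_len_sub s j L hj0 (le_of_lt hL0) hjn
    refine ⟨pvSub s j L, List.mem_filter.mpr ⟨hsub, by
      simp only [decide_eq_true_eq, hlen]; omega⟩, ?_⟩
    rw [pvWBlock, List.mem_map]
    refine ⟨j, List.mem_filter.mpr ⟨(PySem.List.mem_pyRange_one).mpr ⟨hj0, by rw [hlen]; omega⟩, ?_⟩, ?_⟩
    · rw [hlen]
      exact beq_self_eq_true _
    · rw [hlen, hxe]

-- every element of a per-length block: its key value and bounds
lemma pv_mem_blocks (s : String) (dic : List (String × Int)) (L : Int) (hL0 : 0 < L)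
    (_hLn : L ≤ PySem.Str.len s) (x : String × Int × Int)
    (hx : x ∈ pvBlocks s dic (PySem.Str.len s) L) :
    ∃ j : Int, 0 ≤ j ∧ j + L ≤ PySem.Str.len s ∧ x = (pvSub s j L, j, j + L - 1) ∧
      pvKey (PySem.Str.len s) x = j - (PySem.Str.len s + 1) * L := by
  rw [pvBlocks, List.mem_map] at hx
  obtain ⟨j, hj, hxe⟩ := hx
  have hjr := (PySem.List.mem_pyRange_one).mp (List.mem_filter.mp hj).1
  have hjn : j + L ≤ PySem.Str.len s := by omega
  have hlen : PySem.Str.len (pvSub s j L) = L := pv_len_sub s j L hjr.1 (le_of_lt hL0) hjn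
  exact ⟨j, hjr.1, hjn, hxe.symm, by rw [← hxe, pvKey, hlen]⟩

-- A's canonical list is strictly increasing in B's sort key
lemma pv_C_pairwise (s : String) (dic : List (String × Int)) :
    (pvC s dic).Pairwise (fun a b => pvKey (PySem.Str.len s) a < pvKey (PySem.Str.len s) b) := by
  rw [pvC, List.pairwise_flatMap]
  have hlenbound : ∀ L ∈ (PySem.List.pyRange (PySem.Str.len s) 0 (-1)).filter (pvLenHas s dic),
      0 < L ∧ L ≤ PySem.Str.len s := by
    intro L hL
    exact (PySem.List.mem_pyRange_neg_one).mp (List.mem_filter.mp hL).1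
  constructor
  · intro L hL
    obtain ⟨hL0, hLn⟩ := hlenbound L hL
    rw [pvBlocks, List.pairwise_map]
    have hpw : ((PySem.List.pyRange 0 (PySem.Str.len s - L + 1) 1).filter (pvMatch s dic L)).Pairwise (· < ·) :=
      (PySem.List.pairwise_lt_pyRange_one _ _).filter _
    refine hpw.imp_of_mem ?_
    intro j j' hj hj' hlt
    have hjr := (PySem.List.mem_pyRange_one).mp (List.mem_filter.mp hj).1
    have hjr' := (PySem.List.mem_pyRange_one).mp (List.mem_filter.mp hj').1
    have h1 : PySem.Str.len (pvSub s j L) = L := pv_len_sub s j L hjr.1 (le_of_lt hL0) (by omega)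
    have h2 : PySem.Str.len (pvSub s j' L) = L := pv_len_sub s j' L hjr'.1 (le_of_lt hL0) (by omega)
    simp only [pvKey, h1, h2]
    omega
  · have hpw : ((PySem.List.pyRange (PySem.Str.len s) 0 (-1)).filter (pvLenHas s dic)).Pairwise
        (fun a b => b < a) := by
      rw [PySem.List.pyRange_neg_one_eq_reverse, List.filter_reverse]
      exact List.pairwise_reverse.mpr ((PySem.List.pairwise_lt_pyRange_one _ _).filter _)
    refine hpw.imp_of_mem ?_
    intro L L' hL hL' hlt x hx y hy
    obtain ⟨hL0, hLn⟩ := hlenbound L hL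
    obtain ⟨hL0', hLn'⟩ := hlenbound L' hL'
    obtain ⟨j, hj0, hjn, _, hxk⟩ := pv_mem_blocks s dic L hL0 hLn x hx
    obtain ⟨j', hj0', hjn', _, hyk⟩ := pv_mem_blocks s dic L' hL0' hLn' y hy
    rw [hxk, hyk]
    have hmul : (PySem.Str.len s + 1) * (L' + 1) ≤ (PySem.Str.len s + 1) * L :=
      mul_le_mul_of_nonneg_left (by omega) (by omega)
    have hexp : (PySem.Str.len s + 1) * (L' + 1) = (PySem.Str.len s + 1) * L' + (PySem.Str.len s + 1) := by
      ring
    omega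

-- A's canonical list has no duplicates
lemma pv_C_nodup (s : String) (dic : List (String × Int)) : (pvC s dic).Nodup :=
  (pv_C_pairwise s dic).imp (fun h heq => absurd (heq ▸ h) (lt_irrefl _))

-- B's match list has no duplicates
lemma pv_M_nodup (s : String) (dic : List (String × Int)) : (pvM s dic).Nodup := by
  rw [pvM, List.Nodup, List.pairwise_flatMap]
  constructor
  · intro w hw
    rw [pvWBlock, List.pairwise_map]
    refine ((PySem.List.pairwise_lt_pyRange_one _ _).filter _).imp ?_
    intro j j' hlt heq
    have : j = j' := congrArg (fun t => t.2.1) heq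
    omega
  · have hnd : (pvKeysF s dic).Pairwise (· ≠ ·) :=
      ((PySem.Set.nodup_ofList (dic.map Prod.fst)).filter _ : (pvKeysF s dic).Nodup)
    refine hnd.imp ?_
    intro w w' hne x hx y hy heq
    rw [pvWBlock, List.mem_map] at hx hy
    obtain ⟨j, _, hxe⟩ := hx
    obtain ⟨j', _, hye⟩ := hy
    apply hne
    calc w = x.1 := by rw [← hxe]
    _ = y.1 := congrArg (fun t => t.1) heq
    _ = w' := by rw [← hye]

-- sorting B's matches by the combined key yields exactly A's canonical order
lemma pv_sorted_eq (s : String) (dic : List (String × Int)) :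
    PySem.List.sorted (pvM s dic) (pvKey (PySem.Str.len s)) false = pvC s dic := by
  refine PySem.List.sorted_eq_of_perm_of_pairwise_lt _ _ _ ?_ (pv_C_pairwise s dic)
  refine (List.perm_ext_iff_of_nodup (pv_C_nodup s dic) (pv_M_nodup s dic)).mpr ?_
  intro x
  rw [pv_mem_C, pv_mem_M]

-- ===== VERDICT (by name: the statement is the Claim_ definition above) =====
theorem tagger_spec : Claim_equal_tagger := by
  intro s dic _
  show tagger s dic = tagger_alt s dic
  rw [pv_A_eq, pv_B_eq, pv_sorted_eq]
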